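-- pv_equiv track=rewrite | github.com/Shinipsae/CosPro | Test/test03.py | solution8
-- ===== SOURCE A (Python) =====
-- def solution8(password, key):
--     answer = 0
--     match_cnt = 0
--     for k in key: # key를 먼저
--         for p in password:
--             if k == p: # 같으면
--                 match_cnt += 1 # 1 증가
--                 break
--     if match_cnt >= len(key): # 적어도 key 자릿수보다 같거나 커야 함.
--         answer = 1
--     return answer
-- ===== SOURCE B (Python) =====
-- def solution8(password, key):
--     needed = set(key)
--     for p in password:
--         needed.discard(p)
--         if not needed:
--             break
--     return 1 if not needed else 0
-- ===== Notes on version B (the rewrite author's own statement) =====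
-- stated objective: faster
-- what changed: Instead of A's nested per-key scan of password (O(len(key)*len(password))), B builds a set of outstanding keys once and makes a single pass over password, discarding each character from the set and breaking early once it is empty.
import Mathlib
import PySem

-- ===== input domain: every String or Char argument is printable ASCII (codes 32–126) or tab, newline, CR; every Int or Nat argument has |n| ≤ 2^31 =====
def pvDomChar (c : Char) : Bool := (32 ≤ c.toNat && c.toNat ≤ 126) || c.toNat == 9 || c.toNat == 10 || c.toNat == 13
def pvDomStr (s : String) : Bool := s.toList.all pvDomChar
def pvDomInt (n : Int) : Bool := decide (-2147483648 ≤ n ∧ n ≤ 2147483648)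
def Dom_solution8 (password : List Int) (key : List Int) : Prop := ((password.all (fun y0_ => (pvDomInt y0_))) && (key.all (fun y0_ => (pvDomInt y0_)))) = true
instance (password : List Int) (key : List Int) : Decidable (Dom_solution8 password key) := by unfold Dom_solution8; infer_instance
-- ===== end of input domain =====

-- B replaces A's nested per-key scan by one pass over password with a shrinking set of
-- outstanding keys (early break when empty); same result, different traversal (objective: alternative).

-- ===== PORT A =====
-- inner 'for p in password: if k == p: break' — true iff the loop broke (a match was found)
def s8_find (k : Int) (password : List Int) : Bool :=
  match password with
  | [] => false
  | p :: rest => if k == p then true else s8_find k rest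

def solution8 (password : List Int) (key : List Int) : Int :=
  let match_cnt : Int := key.foldl (fun c k => if s8_find k password then c + 1 else c) 0
  if match_cnt ≥ (key.length : Int) then 1 else 0

-- ===== PORT B =====
-- single pass over password: discard each char from the outstanding set, break when empty
def s8_scan (password : List Int) (needed : PySem.Set Int) : PySem.Set Int :=
  match password with
  | [] => needed
  | p :: rest =>
    let needed' := PySem.Set.discard needed p
    if needed'.isEmpty then needed' else s8_scan rest needed'

def solution8_alt (password : List Int) (key : List Int) : Int :=
  if (s8_scan password (PySem.Set.ofList key)).isEmpty then 1 else 0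

-- ===== PRECONDITION & SPEC =====
def Spec_solution8 (password : List Int) (key : List Int) (out : Int) : Prop := out = solution8_alt password key
instance (password : List Int) (key : List Int) (out : Int) : Decidable (Spec_solution8 password key out) := by unfold Spec_solution8; infer_instance

-- ===== CLAIM (what is proved, stated in full; the proofs are below) =====
def Claim_equal_solution8 : Prop := ∀ (password : List Int) (key : List Int), Dom_solution8 password key → Spec_solution8 password key (solution8 password key)

-- ===== LEMMAS AND PROOFS =====

theorem s8_find_iff (k : Int) (pw : List Int) : s8_find k pw = true ↔ k ∈ pw := by
  induction pw with
  | nil => simp [s8_find]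
  | cons p rest ih => by_cases h : k = p <;> simp [s8_find, h, ih]

theorem s8_foldl_cnt (key : List Int) (P : Int → Bool) (c : Int) :
    key.foldl (fun c k => if P k then c + 1 else c) c = c + (key.countP P : Int) := by
  induction key generalizing c with
  | nil => simp
  | cons k rest ih =>
    by_cases h : P k = true <;> simp [List.foldl, h, ih] <;> ring

theorem solution8_eq_one_iff (pw key : List Int) :
    solution8 pw key = 1 ↔ ∀ k ∈ key, k ∈ pw := by
  simp only [solution8, s8_foldl_cnt, zero_add, ge_iff_le]
  have hle := List.countP_le_length (l := key) (p := fun k => s8_find k pw)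
  constructor
  · intro h k hk
    by_contra hnot
    rw [← s8_find_iff] at hnot
    have hlt : key.countP (fun k => s8_find k pw) < key.length := by
      apply Nat.lt_of_le_of_ne hle
      intro he
      have := List.countP_eq_length.1 he k hk
      exact hnot this
    split at h
    · next hc => omega
    · exact absurd h (by norm_num)
  · intro h
    have he : key.countP (fun k => s8_find k pw) = key.length :=
      List.countP_eq_length.2 (fun k hk => (s8_find_iff k pw).2 (h k hk))
    rw [he]; simp

theorem foldl_discard_empty (pw : List Int) :
    pw.foldl (fun s p => PySem.Set.discard s p) ([] : PySem.Set Int) = [] := by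
  induction pw with
  | nil => rfl
  | cons p rest ih => simpa [PySem.Set.discard] using ih

theorem s8_scan_eq_foldl (pw : List Int) (s : PySem.Set Int) :
    s8_scan pw s = pw.foldl (fun s p => PySem.Set.discard s p) s := by
  induction pw generalizing s with
  | nil => rfl
  | cons p rest ih =>
    simp only [s8_scan, List.foldl]
    split
    · next h =>
      rw [List.isEmpty_iff] at h
      rw [h, foldl_discard_empty]
    · exact ih _

theorem mem_foldl_discard (pw : List Int) (s : PySem.Set Int) (x : Int) :
    x ∈ pw.foldl (fun s p => PySem.Set.discard s p) s ↔ x ∈ s ∧ x ∉ pw := by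
  induction pw generalizing s with
  | nil => simp
  | cons p rest ih =>
    simp only [List.foldl, ih, PySem.Set.mem_discard, List.mem_cons]
    tauto

theorem solution8_alt_eq_one_iff (pw key : List Int) :
    solution8_alt pw key = 1 ↔ ∀ k ∈ key, k ∈ pw := by
  unfold solution8_alt
  rw [s8_scan_eq_foldl]
  have key_iff : (pw.foldl (fun s p => PySem.Set.discard s p) (PySem.Set.ofList key)).isEmpty = true
      ↔ ∀ k ∈ key, k ∈ pw := by
    rw [List.isEmpty_iff, List.eq_nil_iff_forall_not_mem]
    constructor
    · intro h k hk
      by_contra hnot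
      exact h k ((mem_foldl_discard _ _ _).2 ⟨(PySem.Set.mem_ofList _ _).2 hk, hnot⟩)
    · intro h x hx
      obtain ⟨hs, hnp⟩ := (mem_foldl_discard _ _ _).1 hx
      exact hnp (h x ((PySem.Set.mem_ofList _ _).1 hs))
  split
  · next h => exact iff_of_true rfl (key_iff.1 h)
  · next h =>
    constructor
    · intro h01; exact absurd h01 (by norm_num)
    · intro hall; exact absurd (key_iff.2 hall) h

theorem solution8_zero_or_one (pw key : List Int) :
    solution8 pw key = 0 ∨ solution8 pw key = 1 := by
  simp only [solution8]; split
  · exact Or.inr rfl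
  · exact Or.inl rfl

theorem solution8_alt_zero_or_one (pw key : List Int) :
    solution8_alt pw key = 0 ∨ solution8_alt pw key = 1 := by
  unfold solution8_alt; split
  · exact Or.inr rfl
  · exact Or.inl rfl

-- ===== VERDICT (by name: the statement is the Claim_ definition above) =====
theorem solution8_spec : Claim_equal_solution8 := by
  intro pw key _
  unfold Spec_solution8
  by_cases hall : ∀ k ∈ key, k ∈ pw
  · exact ((solution8_eq_one_iff pw key).2 hall).trans ((solution8_alt_eq_one_iff pw key).2 hall).symm
  · rcases solution8_zero_or_one pw key with h0 | h1
    · rcases solution8_alt_zero_or_one pw key with g0 | g1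
      · rw [h0, g0]
      · exact absurd ((solution8_alt_eq_one_iff pw key).1 g1) hall
    · exact absurd ((solution8_eq_one_iff pw key).1 h1) hall
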